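-- pv_equiv track=rewrite | github.com/aaryan288/main | sudoku/sudoku/src/sudoku/app.py | finding_missing_values
-- ===== SOURCE A (Python) =====
-- def finding_missing_values(row,c1,c2,c3,c4,c5,c6,c7,c8,c9,num):
--     row = []
--     for a in range(0,len(c1)):
--         for b in range(0,len(c2)):
--             for c in range(0,len(c3)):
--                 for d in range(0,len(c4)):
--                     for e in range(0,len(c5)):
--                         for f in range(0,len(c6)):
--                             for g in range(0,len(c7)):
--                                 for h in range(0,len(c8)):
--                                     for i in range(0,len(c9)):
--                                         row = [c1[a],c2[b],c3[c],c4[d],c5[e],c6[f],c7[g],c8[h],c9[i]]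
--                                         if len(set(row)) == 9:
--                                             return row
-- ===== SOURCE B (Python) =====
-- def finding_missing_values(row, c1, c2, c3, c4, c5, c6, c7, c8, c9, num):
--     # Backtracking over the candidate lists in the same index order,
--     # pruning any branch as soon as a duplicate value appears.
--     cands = [c1, c2, c3, c4, c5, c6, c7, c8, c9]
--
--     def bt(i, chosen):
--         if i == 9:
--             return chosen
--         for v in cands[i]:
--             if v not in chosen:
--                 r = bt(i + 1, chosen + [v])
--                 if r is not None:
--                     return r
--         return None
--
--     return bt(0, [])
-- ===== Notes on version B (the rewrite author's own statement) =====
-- stated objective: alternative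
-- what changed: Replaces the nine nested loops that test every full cross-product tuple for distinctness with a depth-first backtracking search over the same index order that prunes a branch as soon as a chosen value repeats.
import Mathlib
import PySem

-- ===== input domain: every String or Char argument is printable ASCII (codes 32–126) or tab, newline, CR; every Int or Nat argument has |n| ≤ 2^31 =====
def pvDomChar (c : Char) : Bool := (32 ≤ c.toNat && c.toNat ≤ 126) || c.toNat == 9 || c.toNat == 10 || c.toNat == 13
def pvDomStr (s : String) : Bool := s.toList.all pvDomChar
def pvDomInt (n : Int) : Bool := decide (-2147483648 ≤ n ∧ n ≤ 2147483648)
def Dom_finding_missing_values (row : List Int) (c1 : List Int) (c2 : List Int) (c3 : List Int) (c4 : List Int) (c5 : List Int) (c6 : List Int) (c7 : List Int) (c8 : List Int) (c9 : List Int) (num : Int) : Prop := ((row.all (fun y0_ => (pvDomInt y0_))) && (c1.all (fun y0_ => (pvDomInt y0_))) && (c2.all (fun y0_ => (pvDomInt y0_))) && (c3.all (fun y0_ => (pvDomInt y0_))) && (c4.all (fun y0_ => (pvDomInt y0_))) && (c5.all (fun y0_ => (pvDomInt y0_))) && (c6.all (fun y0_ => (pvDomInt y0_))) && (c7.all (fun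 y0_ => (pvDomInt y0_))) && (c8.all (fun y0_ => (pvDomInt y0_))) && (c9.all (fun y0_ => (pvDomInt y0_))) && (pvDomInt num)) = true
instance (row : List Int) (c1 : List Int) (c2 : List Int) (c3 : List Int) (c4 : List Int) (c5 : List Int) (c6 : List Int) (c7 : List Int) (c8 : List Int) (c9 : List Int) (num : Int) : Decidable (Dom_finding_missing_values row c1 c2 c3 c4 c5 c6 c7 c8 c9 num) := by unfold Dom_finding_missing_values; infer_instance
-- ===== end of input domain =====

-- ===== PORT A =====
-- B replaces the exhaustive cross-product scan with a backtracking search in the same index order that prunes duplicate prefixes.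
def finding_missing_values (row : List Int) (c1 : List Int) (c2 : List Int) (c3 : List Int) (c4 : List Int) (c5 : List Int) (c6 : List Int) (c7 : List Int) (c8 : List Int) (c9 : List Int) (num : Int) : Option (List Int) :=
  -- nine nested 'for … : return row on first hit' loops = nested findSome?
  c1.findSome? fun a =>
    c2.findSome? fun b =>
      c3.findSome? fun c =>
        c4.findSome? fun d =>
          c5.findSome? fun e =>
            c6.findSome? fun f =>
              c7.findSome? fun g =>
                c8.findSome? fun h =>
                  c9.findSome? fun i =>
                    let row := [a, b, c, d, e, f, g, h, i]
                    if (PySem.Set.ofList row).length = 9 then some row else none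

-- ===== PORT B =====
-- bt(i, chosen): try each candidate of list i not already in chosen, recurse on i+1
def fmvBt : List (List Int) → List Int → Option (List Int)
  | [], chosen => some chosen
  | cs :: rest, chosen =>
      cs.findSome? fun v => if v ∈ chosen then none else fmvBt rest (chosen ++ [v])

def finding_missing_values_alt (row : List Int) (c1 : List Int) (c2 : List Int) (c3 : List Int) (c4 : List Int) (c5 : List Int) (c6 : List Int) (c7 : List Int) (c8 : List Int) (c9 : List Int) (num : Int) : Option (List Int) :=
  fmvBt [c1, c2, c3, c4, c5, c6, c7, c8, c9] []

-- ===== PRECONDITION & SPEC =====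
def Spec_finding_missing_values (row : List Int) (c1 : List Int) (c2 : List Int) (c3 : List Int) (c4 : List Int) (c5 : List Int) (c6 : List Int) (c7 : List Int) (c8 : List Int) (c9 : List Int) (num : Int) (out : Option (List Int)) : Prop := out = finding_missing_values_alt row c1 c2 c3 c4 c5 c6 c7 c8 c9 num
instance (row : List Int) (c1 : List Int) (c2 : List Int) (c3 : List Int) (c4 : List Int) (c5 : List Int) (c6 : List Int) (c7 : List Int) (c8 : List Int) (c9 : List Int) (num : Int) (out : Option (List Int)) : Decidable (Spec_finding_missing_values row c1 c2 c3 c4 c5 c6 c7 c8 c9 num out) := by unfold Spec_finding_missing_values; infer_instance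

-- ===== CLAIM (what is proved, stated in full; the proofs are below) =====
def Claim_equal_finding_missing_values : Prop := ∀ (row : List Int) (c1 : List Int) (c2 : List Int) (c3 : List Int) (c4 : List Int) (c5 : List Int) (c6 : List Int) (c7 : List Int) (c8 : List Int) (c9 : List Int) (num : Int), Dom_finding_missing_values row c1 c2 c3 c4 c5 c6 c7 c8 c9 num → Spec_finding_missing_values row c1 c2 c3 c4 c5 c6 c7 c8 c9 num (finding_missing_values row c1 c2 c3 c4 c5 c6 c7 c8 c9 num)

-- ===== LEMMAS AND PROOFS =====

-- A's nested loops, recast as a recursion over the list of candidate lists, accumulating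
-- the chosen prefix and testing distinctness (via set size) only at the leaf, exactly like A.
def fmvNest : List (List Int) → List Int → Option (List Int)
  | [], chosen => if (PySem.Set.ofList chosen).length = 9 then some chosen else none
  | cs :: rest, chosen => cs.findSome? fun v => fmvNest rest (chosen ++ [v])

lemma ofList_length_eq_iff (l : List Int) : (PySem.Set.ofList l).length = l.length ↔ l.Nodup := by
  constructor
  · intro h
    have hperm : (PySem.Set.ofList l).Perm l.dedup := by
      rw [List.perm_ext_iff_of_nodup (PySem.Set.nodup_ofList l) l.nodup_dedup]
      intro a; simp [PySem.Set.mem_ofList, List.mem_dedup]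
    have hlen : l.dedup.length = l.length := by rw [← hperm.length_eq, h]
    have hd : l.dedup = l := List.Sublist.eq_of_length l.dedup_sublist hlen
    rw [← hd]; exact l.nodup_dedup
  · intro h; rw [PySem.Set.ofList_eq_self_of_nodup l h]

lemma fmvA_eq_nest (row c1 c2 c3 c4 c5 c6 c7 c8 c9 : List Int) (num : Int) :
    finding_missing_values row c1 c2 c3 c4 c5 c6 c7 c8 c9 num = fmvNest [c1, c2, c3, c4, c5, c6, c7, c8, c9] [] := by
  simp [finding_missing_values, fmvNest]

lemma fmvNest_dead : ∀ (ls : List (List Int)) (chosen : List Int), ¬ chosen.Nodup →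
    chosen.length + ls.length = 9 → fmvNest ls chosen = none := by
  intro ls
  induction ls with
  | nil =>
      intro chosen hnd hlen
      simp only [List.length_nil, Nat.add_zero] at hlen
      rw [fmvNest, if_neg]
      intro h
      exact hnd ((ofList_length_eq_iff chosen).1 (h.trans hlen.symm))
  | cons cs rest ih =>
      intro chosen hnd hlen
      rw [fmvNest]
      rw [List.findSome?_eq_none_iff]
      intro v _
      apply ih
      · intro h
        exact hnd (h.sublist (List.sublist_append_left chosen [v]))
      · simp at hlen ⊢; omega

lemma fmvNest_eq_bt : ∀ (ls : List (List Int)) (chosen : List Int), chosen.Nodup →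
    chosen.length + ls.length = 9 → fmvNest ls chosen = fmvBt ls chosen := by
  intro ls
  induction ls with
  | nil =>
      intro chosen hnd hlen
      simp only [List.length_nil, Nat.add_zero] at hlen
      rw [fmvNest, fmvBt, if_pos]
      have h := (ofList_length_eq_iff chosen).2 hnd
      omega
  | cons cs rest ih =>
      intro chosen hnd hlen
      rw [fmvNest, fmvBt]
      congr 1
      funext v
      by_cases hv : v ∈ chosen
      · rw [if_pos hv]
        apply fmvNest_dead
        · simp [List.nodup_append, hv]
        · simp at hlen ⊢; omega
      · rw [if_neg hv]
        apply ih
        · simp [List.nodup_append, hnd]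
          intro a ha hEq
          exact hv (hEq ▸ ha)
        · simp at hlen ⊢; omega

-- ===== VERDICT (by name: the statement is the Claim_ definition above) =====
theorem finding_missing_values_spec : Claim_equal_finding_missing_values := by
  intro row c1 c2 c3 c4 c5 c6 c7 c8 c9 num _
  unfold Spec_finding_missing_values finding_missing_values_alt
  rw [fmvA_eq_nest]
  exact fmvNest_eq_bt [c1, c2, c3, c4, c5, c6, c7, c8, c9] [] (by simp) (by simp)
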